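-- pv_equiv track=rewrite | github.com/santhosh77h/card-expenses | backend/app/consensus.py | _split_by_provider
-- ===== SOURCE A (Python) =====
-- def _split_by_provider(members: list[tuple[int, dict]]) -> list[list[tuple[int, dict]]]:
--     """
--     Split same-key members ensuring at most one per provider per group.
--
--     If multiple transactions from the same provider have the same key,
--     they form separate groups (could be real duplicate charges).
--     """
--     groups: list[list[tuple[int, dict]]] = []
--     for provider_idx, tx in members:
--         placed = False
--         for group in groups:
--             providers_in_group = {p for p, _ in group}
--             if provider_idx not in providers_in_group:
--                 group.append((provider_idx, tx))
--                 placed = True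
--                 break
--         if not placed:
--             groups.append([(provider_idx, tx)])
--     return groups
-- ===== SOURCE B (Python) =====
-- def _split_by_provider(members: list[tuple[int, dict]]) -> list[list[tuple[int, dict]]]:
--     """One pass: the k-th occurrence of a provider goes to group k (counted per provider)."""
--     counts: dict[int, int] = {}
--     groups: list[list[tuple[int, dict]]] = []
--     for provider_idx, tx in members:
--         k = counts.get(provider_idx, 0)
--         counts[provider_idx] = k + 1
--         if k == len(groups):
--             groups.append([])
--         groups[k].append((provider_idx, tx))
--     return groups
-- ===== Notes on version B (the rewrite author's own statement) =====
-- stated objective: alternative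
-- what changed: Replaces A's first-fit scan over all existing groups (rebuilding a provider set per group per member) with a single pass keeping a per-provider occurrence counter: the k-th occurrence of a provider goes directly to group k.
import Mathlib
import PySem

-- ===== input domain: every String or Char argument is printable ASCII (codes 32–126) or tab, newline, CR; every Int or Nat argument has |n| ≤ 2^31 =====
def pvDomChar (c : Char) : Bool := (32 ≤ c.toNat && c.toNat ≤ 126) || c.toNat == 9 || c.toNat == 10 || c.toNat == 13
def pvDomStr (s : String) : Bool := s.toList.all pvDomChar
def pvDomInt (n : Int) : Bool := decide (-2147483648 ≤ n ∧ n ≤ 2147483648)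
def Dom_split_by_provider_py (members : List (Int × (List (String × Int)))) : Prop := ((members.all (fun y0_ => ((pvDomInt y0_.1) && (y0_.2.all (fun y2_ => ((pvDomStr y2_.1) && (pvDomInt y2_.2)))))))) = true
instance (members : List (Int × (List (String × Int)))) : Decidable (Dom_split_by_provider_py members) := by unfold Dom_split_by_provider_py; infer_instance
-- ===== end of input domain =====

-- B replaces A's first-fit scan over existing groups by a one-pass per-provider occurrence
-- counter that sends the k-th occurrence of a provider directly to group k (objective: alternative).

-- ===== PORT A =====
-- inner 'for group in groups: … break' of A: first group whose provider set misses m.1 gets m appended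
def pvStepA : List (List (Int × (List (String × Int)))) → (Int × (List (String × Int))) → List (List (Int × (List (String × Int))))
  | [], m => [[m]]
  | g :: gs, m =>
    if (PySem.Set.ofList (g.map Prod.fst)).contains m.1 then g :: pvStepA gs m
    else (g ++ [m]) :: gs

def split_by_provider_py (members : List (Int × (List (String × Int)))) : List (List (Int × (List (String × Int)))) :=
  members.foldl pvStepA []

-- ===== PORT B =====
-- loop body of B: k = counts.get(p, 0); counts[p] = k+1; extend groups if k == len(groups); groups[k].append(m)
def pvStepB (st : PySem.Dict Int Int × List (List (Int × (List (String × Int))))) (m : Int × (List (String × Int))) :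
    PySem.Dict Int Int × List (List (Int × (List (String × Int)))) :=
  let k := st.1.getD m.1 0
  let counts := st.1.insert m.1 (k + 1)
  let groups := if k = (st.2.length : Int) then st.2 ++ [[]] else st.2
  (counts, PySem.List.pySetD groups k (PySem.List.pyGetD groups k [] ++ [m]))

def split_by_provider_py_alt (members : List (Int × (List (String × Int)))) : List (List (Int × (List (String × Int)))) :=
  (members.foldl pvStepB (PySem.Dict.empty, [])).2

-- ===== PRECONDITION & SPEC =====
def Spec_split_by_provider_py (members : List (Int × (List (String × Int)))) (out : List (List (Int × (List (String × Int))))) : Prop := out = split_by_provider_py_alt members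
instance (members : List (Int × (List (String × Int)))) (out : List (List (Int × (List (String × Int))))) : Decidable (Spec_split_by_provider_py members out) := by unfold Spec_split_by_provider_py; infer_instance

-- ===== CLAIM (what is proved, stated in full; the proofs are below) =====
def Claim_equal_split_by_provider_py : Prop := ∀ (members : List (Int × (List (String × Int)))), Dom_split_by_provider_py members → Spec_split_by_provider_py members (split_by_provider_py members)

-- ===== LEMMAS AND PROOFS =====

-- Invariant tying B's counter to A's groups: provider p sits in exactly the groups 0 .. count(p)-1.
def pvInv (c : PySem.Dict Int Int) (gs : List (List (Int × (List (String × Int))))) : Prop :=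
  ∀ p : Int, 0 ≤ c.getD p 0 ∧ c.getD p 0 ≤ (gs.length : Int) ∧
    ∀ k : Nat, (hk : k < gs.length) → (p ∈ (gs[k].map Prod.fst) ↔ (k : Int) < c.getD p 0)

-- A's first-fit scan places m at index c when groups 0..c-1 contain m.1 and group c (if any) does not.
lemma pvStepA_place (m : Int × (List (String × Int))) :
    ∀ (gs : List (List (Int × (List (String × Int))))) (c : Nat), c ≤ gs.length →
    (∀ k (hk : k < gs.length), (m.1 ∈ gs[k].map Prod.fst ↔ k < c)) →
    pvStepA gs m = if h : c < gs.length then gs.set c (gs[c] ++ [m]) else gs ++ [[m]]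
  | [], c, hle, _ => by
    have hc0 : c = 0 := Nat.le_zero.mp hle
    subst hc0
    simp [pvStepA]
  | g :: gs, c, hle, hmem => by
    match c with
    | 0 =>
      have h0 : m.1 ∉ g.map Prod.fst := by
        have := hmem 0 (by simp)
        simpa using this
      have hc : (PySem.Set.ofList (g.map Prod.fst)).contains m.1 = false := by
        by_contra h
        exact h0 ((PySem.Set.mem_ofList _ _).1 ((PySem.Set.contains_iff _ _).1 (by simpa using h)))
      simp only [pvStepA, hc, Bool.false_eq_true, if_false]
      simp
    | c + 1 =>
      have h0 : m.1 ∈ g.map Prod.fst := by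
        have := hmem 0 (by simp)
        simpa using this
      have hc : (PySem.Set.ofList (g.map Prod.fst)).contains m.1 = true :=
        (PySem.Set.contains_iff _ _).2 ((PySem.Set.mem_ofList _ _).2 h0)
      have ih := pvStepA_place m gs c (by simpa using hle)
        (fun k hk => by
          have := hmem (k + 1) (by simpa using Nat.succ_lt_succ hk)
          simpa using this)
      by_cases h : c < gs.length
      · simp only [pvStepA, hc, if_true, ih, dif_pos h]
        simp [h]
      · simp only [pvStepA, hc, if_true, ih, dif_neg h]
        have h' : ¬ c + 1 < (g :: gs).length := by simp; omega
        rw [dif_neg h']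
        simp

lemma pvStep_eq (c : PySem.Dict Int Int) (gs : List (List (Int × (List (String × Int)))))
    (m : Int × (List (String × Int))) (h : pvInv c gs) :
    (pvStepB (c, gs) m).2 = pvStepA gs m ∧ pvInv (pvStepB (c, gs) m).1 (pvStepB (c, gs) m).2 := by
  obtain ⟨hnn, hle, hmem⟩ := h m.1
  -- the occurrence count of m.1 as a natural number
  obtain ⟨n, hn⟩ : ∃ n : Nat, c.getD m.1 0 = (n : Int) := ⟨(c.getD m.1 0).toNat, by omega⟩
  have hnle : n ≤ gs.length := by omega
  have hplace := pvStepA_place m gs n hnle (fun k hk => by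
    rw [hmem k hk, hn]; exact_mod_cast Iff.rfl)
  by_cases hcase : n = gs.length
  · -- a new group is created
    have hknat : (pvStepB (c, gs) m).2 = gs ++ [[m]] := by
      simp only [pvStepB, hn, hcase]
      simp [List.set_append_right]
    refine ⟨by rw [hknat, hplace]; simp [hcase], ?_⟩
    rw [hknat]
    intro p
    have hlen : (gs ++ [[m]]).length = gs.length + 1 := by simp
    have hget : (pvStepB (c, gs) m).1.getD p 0 = if p = m.1 then (n : Int) + 1 else c.getD p 0 := by
      simp [pvStepB, PySem.Dict.getD_insert, hn]
    obtain ⟨hnn', hle', hmem'⟩ := h p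
    refine ⟨by rw [hget]; split <;> omega, by rw [hget, hlen]; split <;> omega, ?_⟩
    intro k hk
    rw [hget]
    by_cases hkl : k < gs.length
    · rw [List.getElem_append_left hkl, hmem' k hkl]
      split
      · next hp => subst hp; rw [hn]; constructor <;> intro <;> omega
      · rfl
    · have hkeq : k = gs.length := by rw [hlen] at hk; omega
      subst hkeq
      rw [List.getElem_append_right (le_refl _)]
      simp only [Nat.sub_self]
      split
      · next hp => subst hp; simp; omega
      · next hp => simp [hp]; omega
  · -- m joins the existing group n
    have hlt : n < gs.length := by omega
    have hknat : (pvStepB (c, gs) m).2 = gs.set n (gs[n] ++ [m]) := by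
      have hne : ((n : Int)) ≠ ((gs.length : Int)) := by exact_mod_cast hcase
      simp [pvStepB, hn, hne, List.getElem?_eq_getElem hlt]
    refine ⟨by rw [hknat, hplace]; simp [hlt], ?_⟩
    rw [hknat]
    intro p
    have hlen : (gs.set n (gs[n] ++ [m])).length = gs.length := by simp
    have hget : (pvStepB (c, gs) m).1.getD p 0 = if p = m.1 then (n : Int) + 1 else c.getD p 0 := by
      simp [pvStepB, PySem.Dict.getD_insert, hn]
    obtain ⟨hnn', hle', hmem'⟩ := h p
    refine ⟨by rw [hget]; split <;> omega, by rw [hget, hlen]; split <;> omega, ?_⟩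
    intro k hk
    rw [hlen] at hk
    rw [hget, List.getElem_set]
    by_cases hkn : n = k
    · subst hkn
      simp only [if_true]
      rw [List.map_append]
      split
      · next hp =>
        subst hp
        have := hmem' n hk
        rw [hn] at this
        simp [this]
      · next hp =>
        have := hmem' n hk
        simp [hp, this]
    · rw [if_neg hkn, hmem' k hk]
      split
      · next hp =>
        subst hp
        rw [hn]
        -- k ≠ n, so k < n ↔ k < n + 1
        omega
      · rfl

lemma pvFold_eq : ∀ (ms : List (Int × (List (String × Int)))) (c : PySem.Dict Int Int)
    (gs : List (List (Int × (List (String × Int))))), pvInv c gs →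
    (ms.foldl pvStepB (c, gs)).2 = ms.foldl pvStepA gs
  | [], _, _, _ => rfl
  | m :: ms, c, gs, h => by
    obtain ⟨heq, hinv⟩ := pvStep_eq c gs m h
    simp only [List.foldl_cons]
    rw [pvFold_eq ms (pvStepB (c, gs) m).1 (pvStepB (c, gs) m).2 hinv, heq]

lemma pvInv_empty : pvInv PySem.Dict.empty [] := by
  intro p
  refine ⟨by simp [PySem.Dict.getD_empty], by simp [PySem.Dict.getD_empty], ?_⟩
  intro k hk
  simp at hk

-- ===== VERDICT (by name: the statement is the Claim_ definition above) =====
theorem split_by_provider_py_spec : Claim_equal_split_by_provider_py := by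
  intro members _
  unfold Spec_split_by_provider_py split_by_provider_py split_by_provider_py_alt
  rw [pvFold_eq members PySem.Dict.empty [] pvInv_empty]
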